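-- pv_equiv track=rewrite | github.com/muyeyifeng/Controllable-magnetic-assisted-DLP-3D-printing-project | python_code/io27_shift_test.py | _build_shift_patterns
-- ===== SOURCE A (Python) =====
-- from typing import List
--
-- def _build_shift_patterns(width: int = 8, high_count: int = 4) -> List[List[int]]:
--     if high_count <= 0 or high_count > width:
--         raise ValueError("high_count 必须在 1~width")
--
--     base = [1] * high_count + [0] * (width - high_count)
--     patterns: List[List[int]] = []
--     for shift in range(width):
--         patterns.append(base[-shift:] + base[:-shift] if shift else base[:])
--     return patterns
-- ===== SOURCE B (Python) =====
-- from typing import List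
--
-- def _build_shift_patterns(width: int = 8, high_count: int = 4) -> List[List[int]]:
--     if high_count <= 0 or high_count > width:
--         raise ValueError("high_count 必须在 1~width")
--     return [[1 if (i - shift) % width < high_count else 0 for i in range(width)]
--             for shift in range(width)]
-- ===== Notes on version B (the rewrite author's own statement) =====
-- stated objective: idiomatic
-- what changed: Replaces building a base list and rotating it by two slices per shift with a direct nested comprehension that computes each cell from the closed-form membership test (i - shift) % width < high_count.
import Mathlib
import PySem

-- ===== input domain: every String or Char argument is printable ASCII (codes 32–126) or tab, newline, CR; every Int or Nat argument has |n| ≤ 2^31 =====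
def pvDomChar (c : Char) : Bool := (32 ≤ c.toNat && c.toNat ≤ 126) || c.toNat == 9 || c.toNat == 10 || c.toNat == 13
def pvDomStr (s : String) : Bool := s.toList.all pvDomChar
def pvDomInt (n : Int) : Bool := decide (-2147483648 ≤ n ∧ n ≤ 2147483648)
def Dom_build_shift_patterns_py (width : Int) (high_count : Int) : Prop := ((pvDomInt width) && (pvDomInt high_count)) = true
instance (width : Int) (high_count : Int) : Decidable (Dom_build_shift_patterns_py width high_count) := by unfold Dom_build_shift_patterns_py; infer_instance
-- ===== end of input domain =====

-- B replaces A's base-list-plus-two-slice rotation with a nested comprehension computing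
-- each cell from the closed-form test (i - shift) % width < high_count (idiomatic; same cost).


-- ===== PORT A =====
-- base = [1]*high_count + [0]*(width-high_count); each row is base[-shift:]+base[:-shift] (base[:] for shift=0)
def build_shift_patterns_py (width : Int) (high_count : Int) : List (List Int) :=
  let base : List Int :=
    List.replicate high_count.toNat 1 ++ List.replicate (width - high_count).toNat 0
  (PySem.List.pyRange 0 width 1).foldl
    (fun patterns shift =>
      patterns ++
        [if shift ≠ 0 then
            PySem.List.slice base (some (-shift)) none ++ PySem.List.slice base none (some (-shift))
          else PySem.List.slice base none none])
    []

-- ===== PORT B =====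
def build_shift_patterns_py_alt (width : Int) (high_count : Int) : List (List Int) :=
  (PySem.List.pyRange 0 width 1).map (fun shift =>
    (PySem.List.pyRange 0 width 1).map (fun i =>
      if PySem.Int.mod (i - shift) width < high_count then 1 else 0))

-- ===== PRECONDITION & SPEC =====
-- Pre_ excludes exactly the inputs where A raises ValueError (high_count ≤ 0 or high_count > width).
def Pre_build_shift_patterns_py (width : Int) (high_count : Int) : Prop :=
  1 ≤ high_count ∧ high_count ≤ width
instance (width : Int) (high_count : Int) : Decidable (Pre_build_shift_patterns_py width high_count) := by
  unfold Pre_build_shift_patterns_py; infer_instance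
def pvWitness_build_shift_patterns_py : Int × Int := (8, 4)

def Spec_build_shift_patterns_py (width : Int) (high_count : Int) (out : List (List Int)) : Prop :=
  out = build_shift_patterns_py_alt width high_count
instance (width : Int) (high_count : Int) (out : List (List Int)) : Decidable (Spec_build_shift_patterns_py width high_count out) := by
  unfold Spec_build_shift_patterns_py; infer_instance

-- ===== CLAIM (what is proved, stated in full; the proofs are below) =====
def Claim_equal_build_shift_patterns_py : Prop := ∀ (width : Int) (high_count : Int), Dom_build_shift_patterns_py width high_count → Pre_build_shift_patterns_py width high_count → Spec_build_shift_patterns_py width high_count (build_shift_patterns_py width high_count)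

-- ===== LEMMAS AND PROOFS =====

lemma pv_foldl_push (l : List Int) (f : Int → List Int) (acc : List (List Int)) :
    l.foldl (fun a s => a ++ [f s]) acc = acc ++ l.map f := by
  induction l generalizing acc with
  | nil => simp
  | cons x xs ih => simp [ih]

-- the base list is the pointwise image of the index range under the threshold predicate
lemma pv_base_eq (width high_count : Int) (h1 : 1 ≤ high_count) (h2 : high_count ≤ width) :
    List.replicate high_count.toNat (1:Int) ++ List.replicate (width - high_count).toNat (0:Int)
      = (List.range width.toNat).map (fun (j : ℕ) => if (j:Int) < high_count then 1 else 0) := by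
  apply List.ext_getElem
  · simp; omega
  · intro k hk1 hk2
    simp only [List.getElem_map, List.getElem_range]
    rcases lt_or_ge k high_count.toNat with h | h
    · rw [List.getElem_append_left (by simpa using h)]
      simp only [List.getElem_replicate]
      rw [if_pos (by omega)]
    · rw [List.getElem_append_right (by simpa using h)]
      simp only [List.getElem_replicate]
      rw [if_neg (by omega)]

lemma pv_drop_range (m n : ℕ) :
    (List.range n).drop m = (List.range (n - m)).map (m + ·) := by
  apply List.ext_getElem <;> simp

lemma pv_take_range (m n : ℕ) (h : m ≤ n) :
    (List.range n).take m = List.range m := by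
  apply List.ext_getElem <;> simp
  omega

-- A's row for shift s equals B's row: rotation by two slices = per-cell modular threshold test
lemma pv_row_eq (width high_count s : Int)
    (h1 : 1 ≤ high_count) (h2 : high_count ≤ width) (hs0 : 0 ≤ s) (hsw : s < width) :
    (if s ≠ 0 then
        PySem.List.slice (List.replicate high_count.toNat (1:Int) ++ List.replicate (width - high_count).toNat (0:Int)) (some (-s)) none
          ++ PySem.List.slice (List.replicate high_count.toNat (1:Int) ++ List.replicate (width - high_count).toNat (0:Int)) none (some (-s))
      else PySem.List.slice (List.replicate high_count.toNat (1:Int) ++ List.replicate (width - high_count).toNat (0:Int)) none none)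
    = (PySem.List.pyRange 0 width 1).map (fun i =>
        if PySem.Int.mod (i - s) width < high_count then 1 else 0) := by
  set base : List Int :=
    List.replicate high_count.toNat (1:Int) ++ List.replicate (width - high_count).toNat (0:Int) with hbase
  have hlen : base.length = width.toNat := by simp [hbase]; omega
  set n := width.toNat with hn
  set t := s.toNat with ht
  have hsn : s = (t : Int) := by omega
  have hw : width = (n : Int) := by omega
  have hrot : (if s ≠ 0 then
      PySem.List.slice base (some (-s)) none ++ PySem.List.slice base none (some (-s))
    else PySem.List.slice base none none)
      = base.drop (n - t) ++ base.take (n - t) := by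
    by_cases hs : s = 0
    · have ht0 : t = 0 := by omega
      subst hs
      simp [PySem.List.slice_none_none, ht0, ← hlen]
    · rw [if_pos hs, hsn,
        PySem.List.slice_from_neg_natCast base t (by omega),
        PySem.List.slice_to_neg_natCast base t (by omega), hlen]
  rw [hrot, hbase, pv_base_eq width high_count h1 h2, ← hn]
  rw [← List.map_drop, ← List.map_take, pv_drop_range (n - t) n,
    pv_take_range (n - t) n (by omega), List.map_map]
  have hsplit : PySem.List.pyRange 0 width 1
      = PySem.List.pyRange 0 s 1 ++ PySem.List.pyRange s width 1 :=
    PySem.List.pyRange_one_append 0 s width hs0 (le_of_lt hsw)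
  rw [hsplit, List.map_append]
  congr 1
  · -- first t cells come from the dropped tail of base
    rw [hsn, PySem.List.pyRange_one, List.map_map]
    have hlen1 : n - (n - t) = t := by omega
    have hlen2 : ((t:Int) - 0).toNat = t := by omega
    rw [hlen1, hlen2]
    apply List.map_congr_left
    intro k hk
    have hkt : k < t := List.mem_range.mp hk
    simp only [Function.comp_apply]
    have hmod : PySem.Int.mod ((0 + (k:Int)) - (t:Int)) width = ((0 + (k:Int)) - (t:Int)) % width :=
      PySem.Int.mod_eq_emod_of_pos (by omega)
    rw [hmod]
    have e1 : ((0:Int) + k - (t:Int)) % width = ((0:Int) + k - (t:Int) + width) % width := by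
      conv_rhs => rw [Int.add_emod_right]
    have e2 : ((0:Int) + k - (t:Int) + width) % width = (0:Int) + k - (t:Int) + width :=
      Int.emod_eq_of_lt (by omega) (by omega)
    rw [e1, e2]
    have hcast : ((n - t + k : ℕ) : Int) = (0:Int) + k - (t:Int) + width := by push_cast; omega
    rw [hcast]
  · -- remaining cells come from the head of base
    rw [hsn, PySem.List.pyRange_one, List.map_map, hw]
    have hlen2 : (((n:Int)) - (t:Int)).toNat = n - t := by omega
    rw [hlen2]
    apply List.map_congr_left
    intro k hk
    have hkt : k < n - t := List.mem_range.mp hk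
    simp only [Function.comp_apply]
    have hmod : PySem.Int.mod (((t:Int) + k) - (t:Int)) (n:Int) = (((t:Int) + k) - (t:Int)) % (n:Int) :=
      PySem.Int.mod_eq_emod_of_pos (by omega)
    rw [hmod]
    have e2 : ((t:Int) + k - (t:Int)) % (n:Int) = (t:Int) + k - (t:Int) :=
      Int.emod_eq_of_lt (by omega) (by omega)
    rw [e2]
    have hcast : ((k : ℕ) : Int) = (t:Int) + k - t := by omega
    rw [← hcast]

-- ===== VERDICT (by name: the statement is the Claim_ definition above) =====
theorem build_shift_patterns_py_spec : Claim_equal_build_shift_patterns_py := by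
  intro width high_count _hdom hpre
  obtain ⟨h1, h2⟩ := hpre
  unfold Spec_build_shift_patterns_py build_shift_patterns_py build_shift_patterns_py_alt
  simp only []
  rw [pv_foldl_push, List.nil_append]
  apply List.map_congr_left
  intro s hs
  obtain ⟨hs0, hsw⟩ := (PySem.List.mem_pyRange_one).mp hs
  exact pv_row_eq width high_count s h1 h2 hs0 hsw
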